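-- pv_equiv track=rewrite | github.com/capstone-team-a/Perception | src/server/cea_608_encoder/caption_string_utility.py | bytes_to_byte_pairs
-- ===== SOURCE A (Python) =====
-- from collections import deque
--
-- def bytes_to_byte_pairs(byte_list: list) -> list:
--     """Join neighboring bytes into a byte pair
--
--     :param byte_list:
--     :return: list of byte pairs ['a0', 'e5'] -> ['a0e5']
--     """
--     byte_pairs = []
--
--     if len(byte_list) % 2 != 0:
--         raise ValueError('Can not create byte pairs for an odd length list')
--
--     byte_list = deque(byte_list)
--     while byte_list:
--         first_byte = byte_list.popleft()
--         second_byte = byte_list.popleft()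
--         byte_pairs.append(first_byte + second_byte)
--
--     return byte_pairs
-- ===== SOURCE B (Python) =====
-- def bytes_to_byte_pairs(byte_list: list) -> list:
--     """Join neighboring bytes into a byte pair (even/odd strided slices zipped)."""
--     if len(byte_list) % 2 != 0:
--         raise ValueError('Can not create byte pairs for an odd length list')
--     return [first + second for first, second in zip(byte_list[::2], byte_list[1::2])]
-- ===== Notes on version B (the rewrite author's own statement) =====
-- stated objective: idiomatic
-- what changed: Replaced the deque consumed by two popleft calls per iteration with two strided slices (even/odd positions) combined pairwise by zip in a comprehension.
import Mathlib
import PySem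

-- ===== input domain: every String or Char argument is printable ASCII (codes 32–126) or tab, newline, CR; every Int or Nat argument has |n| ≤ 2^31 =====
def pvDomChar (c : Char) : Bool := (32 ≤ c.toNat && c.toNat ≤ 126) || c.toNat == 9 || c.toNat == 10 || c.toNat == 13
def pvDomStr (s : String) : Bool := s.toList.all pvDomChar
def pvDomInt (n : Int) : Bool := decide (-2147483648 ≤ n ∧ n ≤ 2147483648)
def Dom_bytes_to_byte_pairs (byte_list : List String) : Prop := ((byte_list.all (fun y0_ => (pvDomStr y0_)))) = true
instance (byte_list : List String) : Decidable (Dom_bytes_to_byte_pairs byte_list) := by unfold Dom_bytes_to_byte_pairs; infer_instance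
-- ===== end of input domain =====

-- B builds the byte pairs by zipping the even- and odd-position strided slices instead of consuming a deque (idiomatic, same cost).


-- ===== PORT A =====
-- while byte_list: pop two from the left, append their concatenation.
-- On odd length A raises ValueError (excluded by Pre_); the guard branch's value is never reached inside Pre_.
def pvLoopA (q : List String) (acc : List String) : List String :=
  match q with
  | first_byte :: second_byte :: rest => pvLoopA rest (acc ++ [first_byte ++ second_byte])
  | _ => acc

def bytes_to_byte_pairs (byte_list : List String) : List String :=
  if byte_list.length % 2 ≠ 0 then []  -- raise ValueError: outside Pre_
  else pvLoopA byte_list []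

-- ===== PORT B =====
-- every second element starting at the head: exact port of the step-2 slice xs[::2]
def pvEvery2 {α : Type} : List α → List α
  | [] => []
  | [x] => [x]
  | x :: _ :: rest => x :: pvEvery2 rest

def bytes_to_byte_pairs_alt (byte_list : List String) : List String :=
  if byte_list.length % 2 ≠ 0 then []  -- raise ValueError: outside Pre_
  else ((pvEvery2 byte_list).zip (pvEvery2 (byte_list.drop 1))).map (fun p => p.1 ++ p.2)

-- ===== PRECONDITION & SPEC =====
-- Pre_ excludes odd-length lists, on which A raises ValueError.
def Pre_bytes_to_byte_pairs (byte_list : List String) : Prop := byte_list.length % 2 = 0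
instance (byte_list : List String) : Decidable (Pre_bytes_to_byte_pairs byte_list) := by unfold Pre_bytes_to_byte_pairs; infer_instance
def pvWitness_bytes_to_byte_pairs : List String := ["a0", "e5"]
def Spec_bytes_to_byte_pairs (byte_list : List String) (out : List String) : Prop := out = bytes_to_byte_pairs_alt byte_list
instance (byte_list : List String) (out : List String) : Decidable (Spec_bytes_to_byte_pairs byte_list out) := by unfold Spec_bytes_to_byte_pairs; infer_instance

-- ===== CLAIM (what is proved, stated in full; the proofs are below) =====
def Claim_equal_bytes_to_byte_pairs : Prop := ∀ (byte_list : List String), Dom_bytes_to_byte_pairs byte_list → Pre_bytes_to_byte_pairs byte_list → Spec_bytes_to_byte_pairs byte_list (bytes_to_byte_pairs byte_list)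

-- ===== LEMMAS AND PROOFS =====
theorem pvEvery2_cons (y : String) (l : List String) :
    pvEvery2 (y :: l) = y :: pvEvery2 l.tail := by
  cases l <;> simp [pvEvery2]

theorem pvLoopA_eq (q : List String) : ∀ acc, pvLoopA q acc =
    acc ++ ((pvEvery2 q).zip (pvEvery2 (q.drop 1))).map (fun p => p.1 ++ p.2) := by
  induction q using pvEvery2.induct with
  | case1 => intro acc; simp [pvLoopA, pvEvery2]
  | case2 x => intro acc; simp [pvLoopA, pvEvery2]
  | case3 x y rest ih => intro acc; simp [pvLoopA, pvEvery2, ih, pvEvery2_cons]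

-- ===== VERDICT (by name: the statement is the Claim_ definition above) =====
theorem bytes_to_byte_pairs_spec : Claim_equal_bytes_to_byte_pairs := by
  intro byte_list _ _
  unfold Spec_bytes_to_byte_pairs bytes_to_byte_pairs bytes_to_byte_pairs_alt
  split_ifs with h
  · rfl
  · simpa using pvLoopA_eq byte_list []
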